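-- pv_equiv track=rewrite | github.com/kim-ellen821/mycoding | baekjoon/완전탐색/실4-3085.py | check
-- ===== SOURCE A (Python) =====
-- def check(board):
--     N = len(board)
--     big = -1
--     for i in range(N):
--         count, now = 1, board[i][0]
--         for j in range(1, N):
--             if board[i][j] == now:
--                 count+=1
--             else:
--                 big = max(big, count)
--                 count, now = 1, board[i][j]
--         big = max(big, count)
--     for i in range(N):
--         count, now = 1, board[0][i]
--         for j in range(1, N):
--             if board[j][i] == now:
--                 count+=1
--             else:
--                 big = max(big, count)
--                 count, now = 1, board[j][i]
--         big = max(big, count)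
--     return big
-- ===== SOURCE B (Python) =====
-- def _longest(line):
--     # longest run by repeatedly slicing off the leading group
--     best = 0
--     while line:
--         head = line[0]
--         k = 1
--         while k < len(line) and line[k] == head:
--             k += 1
--         best = max(best, k)
--         line = line[k:]
--     return best
--
--
-- def check(board):
--     n = len(board)
--     lines = [row[:n] for row in board] + [[row[i] for row in board] for i in range(n)]
--     best = -1
--     for line in lines:
--         best = max(best, _longest(line))
--     return best
-- ===== Notes on version B (the rewrite author's own statement) =====
-- stated objective: simpler
-- what changed: B builds the list of lines (rows truncated to n plus explicitly materialised columns) and computes each line's longest run by slicing off one whole leading group at a time (two-pointer group scan), instead of A's per-cell (count, now) state machine with inline big updates and board[j][i] index arithmetic.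
import Mathlib
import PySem

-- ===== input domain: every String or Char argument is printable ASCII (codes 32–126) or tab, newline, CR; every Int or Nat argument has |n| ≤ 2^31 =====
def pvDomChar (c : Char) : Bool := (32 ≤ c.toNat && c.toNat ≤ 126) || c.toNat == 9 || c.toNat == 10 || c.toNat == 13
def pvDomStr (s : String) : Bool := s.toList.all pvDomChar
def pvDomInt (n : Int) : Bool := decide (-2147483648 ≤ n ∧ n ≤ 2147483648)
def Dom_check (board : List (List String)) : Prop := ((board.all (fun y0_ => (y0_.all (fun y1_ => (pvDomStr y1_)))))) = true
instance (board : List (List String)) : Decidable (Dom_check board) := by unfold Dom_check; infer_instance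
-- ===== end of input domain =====

-- B computes each line's longest run by slicing off one leading group at a time over an
-- explicit list of lines (rows truncated to n, plus materialised columns), instead of A's
-- per-cell (count, now) state machine with inline big updates and board[j][i] indexing.

-- ===== PORT A =====
def check (board : List (List String)) : Int :=
  let N : Int := (board.length : Int)
  let big : Int := -1
  let big :=
    (PySem.List.pyRange 0 N 1).foldl (fun big i =>
      let row := PySem.List.pyGetD board i []
      let st : Int × Int × String := (big, 1, PySem.List.pyGetD row 0 "")
      let st :=
        (PySem.List.pyRange 1 N 1).foldl (fun st j =>
          if PySem.List.pyGetD row j "" == st.2.2 then (st.1, st.2.1 + 1, st.2.2)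
          else (max st.1 st.2.1, 1, PySem.List.pyGetD row j "")) st
      max st.1 st.2.1) big
  let big :=
    (PySem.List.pyRange 0 N 1).foldl (fun big i =>
      let st : Int × Int × String := (big, 1, PySem.List.pyGetD (PySem.List.pyGetD board 0 []) i "")
      let st :=
        (PySem.List.pyRange 1 N 1).foldl (fun st j =>
          if PySem.List.pyGetD (PySem.List.pyGetD board j []) i "" == st.2.2 then (st.1, st.2.1 + 1, st.2.2)
          else (max st.1 st.2.1, 1, PySem.List.pyGetD (PySem.List.pyGetD board j []) i "")) st
      max st.1 st.2.1) big
  big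

-- ===== PORT B =====
-- inner 'while k < len(line) and line[k] == head' scans the leading group: takeWhile/drop
def longestB : List String → Int → Int
  | [], best => best
  | x :: xs, best =>
    let k := 1 + ((xs.takeWhile (fun y => y == x)).length : Int)
    longestB (xs.drop (xs.takeWhile (fun y => y == x)).length) (max best k)
termination_by l => l.length
decreasing_by simp

def check_alt (board : List (List String)) : Int :=
  let n : Int := (board.length : Int)
  let lines := board.map (fun row => PySem.List.slice row none (some n)) ++
    (PySem.List.pyRange 0 n 1).map (fun i => board.map (fun row => PySem.List.pyGetD row i ""))
  lines.foldl (fun best line => max best (longestB line 0)) (-1)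

-- ===== PRECONDITION & SPEC =====
-- Pre_ excludes exactly the boards on which A raises IndexError: some row shorter than len(board).
def Pre_check (board : List (List String)) : Prop :=
  ∀ row ∈ board, board.length ≤ row.length
instance (board : List (List String)) : Decidable (Pre_check board) := by unfold Pre_check; infer_instance
def pvWitness_check : List (List String) := [["a", "a"], ["a", "b"]]
def Spec_check (board : List (List String)) (out : Int) : Prop := out = check_alt board
instance (board : List (List String)) (out : Int) : Decidable (Spec_check board out) := by unfold Spec_check; infer_instance

-- ===== CLAIM (what is proved, stated in full; the proofs are below) =====
def Claim_equal_check : Prop := ∀ (board : List (List String)), Dom_check board → Pre_check board → Spec_check board (check board)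

-- ===== LEMMAS AND PROOFS =====

-- A's inner-loop step on one cell
def stepA (st : Int × Int × String) (c : String) : Int × Int × String :=
  if c == st.2.2 then (st.1, st.2.1 + 1, st.2.2) else (max st.1 st.2.1, 1, c)

-- A's whole row treatment: fold the tail, then big = max(big, count)
def rowA (xs : List String) (big cnt : Int) (now : String) : Int :=
  max (xs.foldl stepA (big, cnt, now)).1 (xs.foldl stepA (big, cnt, now)).2.1

theorem drop_len_takeWhile {α : Type} (p : α → Bool) (xs : List α) :
    xs.drop (xs.takeWhile p).length = xs.dropWhile p := by
  induction xs with
  | nil => rfl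
  | cons x xs ih =>
    by_cases h : p x = true <;> simp [List.takeWhile, List.dropWhile, h, ih]

theorem longestB_nonneg : ∀ (n : Nat) (l : List String), l.length ≤ n →
    ∀ b : Int, 0 ≤ b → 0 ≤ longestB l b := by
  intro n
  induction n with
  | zero =>
    intro l hl b hb
    have : l = [] := by cases l <;> simp_all
    subst this; simpa [longestB] using hb
  | succ n ih =>
    intro l hl b hb
    cases l with
    | nil => simpa [longestB] using hb
    | cons x xs =>
      simp only [longestB]
      apply ih
      · simp at hl ⊢; omega
      · positivity

theorem longestB_acc : ∀ (n : Nat) (l : List String), l.length ≤ n →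
    ∀ b : Int, 0 ≤ b → longestB l b = max b (longestB l 0) := by
  intro n
  induction n with
  | zero =>
    intro l hl b hb
    have : l = [] := by cases l <;> simp_all
    subst this; simp [longestB]; omega
  | succ n ih =>
    intro l hl b hb
    cases l with
    | nil => simp [longestB]; omega
    | cons x xs =>
      simp only [longestB]
      have hlen : (xs.drop (xs.takeWhile (fun y => y == x)).length).length ≤ n := by
        simp at hl ⊢; omega
      rw [ih _ hlen (max b (1 + ((xs.takeWhile (fun y => y == x)).length : Int))) (by positivity),
        ih _ hlen (max 0 (1 + ((xs.takeWhile (fun y => y == x)).length : Int))) (by positivity)]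
      have hL := longestB_nonneg n _ hlen 0 le_rfl
      omega

theorem rowA_eq : ∀ (n : Nat) (xs : List String), xs.length ≤ n →
    ∀ (big cnt : Int) (now : String), 1 ≤ cnt →
    rowA xs big cnt now =
      max big (max (cnt + ((xs.takeWhile (fun y => y == now)).length : Int))
        (longestB (xs.dropWhile (fun y => y == now)) 0)) := by
  intro n
  induction n with
  | zero =>
    intro xs hl big cnt now hc
    have : xs = [] := by cases xs <;> simp_all
    subst this; simp [rowA, longestB]; omega
  | succ n ih =>
    intro xs hl big cnt now hc
    cases xs with
    | nil => simp [rowA, longestB]; omega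
    | cons x xs =>
      by_cases h : (x == now) = true
      · have hnow : x = now := by simpa using h
        subst hnow
        have : rowA (x :: xs) big cnt x = rowA xs big (cnt + 1) x := by
          simp [rowA, stepA]
        rw [this, ih xs (by simp at hl; omega) big (cnt+1) x (by omega)]
        simp [List.takeWhile, List.dropWhile]
        omega
      · have : rowA (x :: xs) big cnt now = rowA xs (max big cnt) 1 x := by
          simp [rowA, stepA, h]
        rw [this, ih xs (by simp at hl; omega) (max big cnt) 1 x (by omega)]
        have hxs : (x :: xs).dropWhile (fun y => y == now) = x :: xs := by
          simp [List.dropWhile, h]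
        have htw : (x :: xs).takeWhile (fun y => y == now) = [] := by
          simp [List.takeWhile, h]
        rw [hxs, htw]
        have hdl : (xs.dropWhile (fun y => y == x)).length ≤ xs.length := by
          rw [← drop_len_takeWhile]; simp
        have hexp : longestB (x :: xs) 0 =
            max (max 0 (1 + ((xs.takeWhile (fun y => y == x)).length : Int)))
              (longestB (xs.dropWhile (fun y => y == x)) 0) := by
          rw [longestB, drop_len_takeWhile]
          exact longestB_acc xs.length _ hdl _ (by positivity)
        rw [hexp]
        have h0 : max (0:Int) (1 + ((xs.takeWhile (fun y => y == x)).length : Int)) =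
            1 + ((xs.takeWhile (fun y => y == x)).length : Int) := max_eq_right (by positivity)
        rw [h0]
        simp [max_assoc]

theorem rowA_longest (x : String) (xs : List String) (big : Int) :
    rowA xs big 1 x = max big (longestB (x :: xs) 0) := by
  rw [rowA_eq xs.length xs le_rfl big 1 x le_rfl]
  have hdl : (xs.dropWhile (fun y => y == x)).length ≤ xs.length := by
    rw [← drop_len_takeWhile]; simp
  have hexp : longestB (x :: xs) 0 =
      max (max 0 (1 + ((xs.takeWhile (fun y => y == x)).length : Int)))
        (longestB (xs.dropWhile (fun y => y == x)) 0) := by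
    rw [longestB, drop_len_takeWhile]
    exact longestB_acc xs.length _ hdl _ (by positivity)
  rw [hexp]
  have h0 : max (0:Int) (1 + ((xs.takeWhile (fun y => y == x)).length : Int)) =
      1 + ((xs.takeWhile (fun y => y == x)).length : Int) := max_eq_right (by positivity)
  rw [h0]

theorem pyGetD_take (row : List String) (N : Nat) (k : Nat) (d : String) (hk : k < N) :
    PySem.List.pyGetD (row.take N) (k : Int) d = PySem.List.pyGetD row (k : Int) d := by
  rw [PySem.List.pyGetD_natCast, PySem.List.pyGetD_natCast]
  simp [List.getD, hk]

-- A's row-loop body (the body of 'for i in range(N)' in the first loop), as check computes it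
def rowBody (N : Int) (big : Int) (row : List String) : Int :=
  let st := (PySem.List.pyRange 1 N 1).foldl (fun st j =>
      if PySem.List.pyGetD row j "" == st.2.2 then (st.1, st.2.1 + 1, st.2.2)
      else (max st.1 st.2.1, 1, PySem.List.pyGetD row j ""))
      ((big, 1, PySem.List.pyGetD row 0 "") : Int × Int × String)
  max st.1 st.2.1

-- A's column-loop body (the body of 'for i in range(N)' in the second loop)
def colBody (board : List (List String)) (big i : Int) : Int :=
  let N : Int := (board.length : Int)
  let st := (PySem.List.pyRange 1 N 1).foldl (fun st j =>
      if PySem.List.pyGetD (PySem.List.pyGetD board j []) i "" == st.2.2 then (st.1, st.2.1 + 1, st.2.2)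
      else (max st.1 st.2.1, 1, PySem.List.pyGetD (PySem.List.pyGetD board j []) i ""))
      ((big, 1, PySem.List.pyGetD (PySem.List.pyGetD board 0 []) i "") : Int × Int × String)
  max st.1 st.2.1

theorem check_eq (board : List (List String)) :
    check board =
      (PySem.List.pyRange 0 (board.length : Int)).foldl (fun big i => colBody board big i)
        ((PySem.List.pyRange 0 (board.length : Int)).foldl
          (fun big i => rowBody (board.length : Int) big (PySem.List.pyGetD board i [])) (-1)) := rfl

theorem rowBody_eq (N : Nat) (hN : 1 ≤ N) (row : List String) (hrow : N ≤ row.length) (big : Int) :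
    rowBody (N : Int) big row = max big (longestB (row.take N) 0) := by
  cases row with
  | nil => simp at hrow; omega
  | cons c rs =>
  have htake : (c :: rs).take N = c :: rs.take (N - 1) := by
    cases N with
    | zero => omega
    | succ m => simp
  have hlen : (((c :: rs).take N).length : Int) = (N : Int) := by
    simp at hrow ⊢; omega
  have hcong : ∀ (st : Int × Int × String), ∀ j ∈ PySem.List.pyRange 1 (N : Int) 1,
      (fun (st : Int × Int × String) j =>
        if PySem.List.pyGetD (c :: rs) j "" == st.2.2 then (st.1, st.2.1 + 1, st.2.2)
        else (max st.1 st.2.1, 1, PySem.List.pyGetD (c :: rs) j "")) st j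
      = (fun (st : Int × Int × String) j =>
        if PySem.List.pyGetD ((c :: rs).take N) j "" == st.2.2 then (st.1, st.2.1 + 1, st.2.2)
        else (max st.1 st.2.1, 1, PySem.List.pyGetD ((c :: rs).take N) j "")) st j := by
    intro st j hj
    rw [PySem.List.mem_pyRange_one] at hj
    obtain ⟨k, rfl⟩ := Int.eq_ofNat_of_zero_le (by omega : (0:Int) ≤ j)
    have hk : k < N := by exact_mod_cast hj.2
    simp only [pyGetD_take _ _ _ _ hk]
  unfold rowBody
  rw [PySem.List.foldl_congr_mem _ _ _ _ hcong]
  rw [PySem.List.pyGetD_zero_cons]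
  rw [← hlen]
  rw [PySem.List.foldl_pyRange_pyGetD' ((c :: rs).take N) ""
    (fun (st : Int × Int × String) c' =>
      if c' == st.2.2 then (st.1, st.2.1 + 1, st.2.2)
      else (max st.1 st.2.1, 1, c')) (big, 1, c) (by norm_num)]
  rw [htake]
  change rowA (rs.take (N - 1)) big 1 c = _
  rw [rowA_longest]

theorem colBody_eq (r0 : List String) (rest : List (List String)) (big i : Int) :
    colBody (r0 :: rest) big i =
      max big (longestB ((r0 :: rest).map (fun row => PySem.List.pyGetD row i "")) 0) := by
  unfold colBody
  dsimp only
  rw [PySem.List.foldl_pyRange_pyGetD' (r0 :: rest) []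
    (fun (st : Int × Int × String) row =>
      if PySem.List.pyGetD row i "" == st.2.2 then (st.1, st.2.1 + 1, st.2.2)
      else (max st.1 st.2.1, 1, PySem.List.pyGetD row i "")) _ (by norm_num)]
  rw [PySem.List.pyGetD_zero_cons]
  simp only [Int.toNat_one, List.drop_succ_cons, List.drop_zero]
  rw [show rest.foldl (fun (st : Int × Int × String) row =>
      if PySem.List.pyGetD row i "" == st.2.2 then (st.1, st.2.1 + 1, st.2.2)
      else (max st.1 st.2.1, 1, PySem.List.pyGetD row i ""))
      ((big, 1, PySem.List.pyGetD r0 i "") : Int × Int × String)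
    = (rest.map (fun row => PySem.List.pyGetD row i "")).foldl
      (fun (st : Int × Int × String) c' =>
        if c' == st.2.2 then (st.1, st.2.1 + 1, st.2.2)
        else (max st.1 st.2.1, 1, c'))
      ((big, 1, PySem.List.pyGetD r0 i "") : Int × Int × String) from
    (List.foldl_map (f := fun row => PySem.List.pyGetD row i "")
      (g := fun (st : Int × Int × String) c' =>
        if c' == st.2.2 then (st.1, st.2.1 + 1, st.2.2)
        else (max st.1 st.2.1, 1, c'))
      (l := rest) (init := ((big, 1, PySem.List.pyGetD r0 i "") : Int × Int × String))).symm]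
  change rowA (rest.map (fun row => PySem.List.pyGetD row i "")) big 1 (PySem.List.pyGetD r0 i "") = _
  rw [rowA_longest]
  simp [List.map]

theorem check_spec : Claim_equal_check := by
  intro board _ hpre
  unfold Spec_check
  cases board with
  | nil => decide
  | cons r0 rest =>
    rw [check_eq]
    unfold check_alt
    rw [List.foldl_append]
    simp only [PySem.List.slice_to_natCast]
    rw [List.foldl_map, List.foldl_map]
    rw [PySem.List.foldl_pyRange_zero_pyGetD' (r0 :: rest) []
      (rowBody ((r0 :: rest).length : Int)) (-1)]
    have hrowfun : ∀ (b : Int), ∀ row ∈ (r0 :: rest),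
        rowBody ((r0 :: rest).length : Int) b row =
          max b (longestB (row.take (r0 :: rest).length) 0) :=
      fun b row hmem => rowBody_eq _ (by simp) row (hpre row hmem) b
    rw [PySem.List.foldl_congr_mem (r0 :: rest) _ _ (-1) hrowfun]
    have hcolfun : ∀ (b : Int), ∀ i ∈ PySem.List.pyRange 0 (((r0 :: rest).length : Nat) : Int) 1,
        colBody (r0 :: rest) b i =
          max b (longestB ((r0 :: rest).map (fun row => PySem.List.pyGetD row i "")) 0) :=
      fun b i _ => colBody_eq r0 rest b i
    rw [PySem.List.foldl_congr_mem _ _ _ _ hcolfun]
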